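-- pv_equiv track=rewrite | github.com/fvckinfa/AoC | code/day02.py | sum_in_ranges
-- ===== SOURCE A (Python) =====
-- from bisect import bisect_left, bisect_right
-- from typing import List, Tuple
--
-- def sum_in_ranges(sorted_vals: List[int], ranges: List[Tuple[int, int]]) -> int:
--     # prefix sums for O(log n) range sum
--     pref = [0]
--     acc = 0
--     for v in sorted_vals:
--         acc += v
--         pref.append(acc)
--
--     total = 0
--     for a, b in ranges:
--         lo = bisect_left(sorted_vals, a)
--         hi = bisect_right(sorted_vals, b)
--         total += pref[hi] - pref[lo]
--     return total
-- ===== SOURCE B (Python) =====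
-- from typing import List, Tuple
--
-- def sum_in_ranges(sorted_vals: List[int], ranges: List[Tuple[int, int]]) -> int:
--     # Signed cumulative scan: no prefix array, no binary search.
--     # For each query, add every value up to b and subtract every value below a.
--     total = 0
--     for a, b in ranges:
--         for v in sorted_vals:
--             if v <= b:
--                 total += v
--             if v < a:
--                 total -= v
--     return total
-- ===== Notes on version B (the rewrite author's own statement) =====
-- stated objective: simpler
-- what changed: Replaced the prefix-sum array plus bisect binary searches with a direct signed scan per query: add each value v with v <= b and subtract each value v with v < a, keeping only a running total.
-- outside the precondition, e.g. on sum_in_ranges([3, 1], [(2, 3)]): A returns 0, B returns 3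
import Mathlib
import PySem

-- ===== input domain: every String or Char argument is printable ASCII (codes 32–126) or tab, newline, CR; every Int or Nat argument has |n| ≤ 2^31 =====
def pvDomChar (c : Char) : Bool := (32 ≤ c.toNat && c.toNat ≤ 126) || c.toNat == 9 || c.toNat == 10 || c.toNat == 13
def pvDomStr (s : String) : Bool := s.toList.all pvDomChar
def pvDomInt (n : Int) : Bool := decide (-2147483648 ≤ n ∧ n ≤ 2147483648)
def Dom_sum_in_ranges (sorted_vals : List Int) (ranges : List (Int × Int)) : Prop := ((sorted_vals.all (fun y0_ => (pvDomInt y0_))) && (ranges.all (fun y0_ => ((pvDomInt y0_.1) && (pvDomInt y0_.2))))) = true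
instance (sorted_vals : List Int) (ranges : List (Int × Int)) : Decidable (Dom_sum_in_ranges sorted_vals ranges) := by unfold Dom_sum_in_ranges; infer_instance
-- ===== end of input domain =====

-- B drops A's prefix-sum array and bisect binary searches for a direct signed scan per
-- query (add v when v ≤ b, subtract v when v < a); objective: simpler, not faster.

-- ===== PORT A =====
-- bisect.bisect_left: lo = 0, hi = len; while lo < hi: mid = (lo+hi)//2;
-- if a[mid] < x: lo = mid+1 else hi = mid.  (mid is always in range, so getD is exact;
-- mid = (lo + hi) / 2 is inlined at its two uses.)
def pvBisectLeftGo (xs : List Int) (x : Int) (lo hi : Nat) : Nat :=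
  if _h : lo < hi then
    if xs.getD ((lo + hi) / 2) 0 < x then pvBisectLeftGo xs x ((lo + hi) / 2 + 1) hi
    else pvBisectLeftGo xs x lo ((lo + hi) / 2)
  else lo
termination_by hi - lo
decreasing_by all_goals omega

def pvBisectLeft (xs : List Int) (x : Int) : Nat := pvBisectLeftGo xs x 0 xs.length

-- bisect.bisect_right: if x < a[mid]: hi = mid else lo = mid+1.
def pvBisectRightGo (xs : List Int) (x : Int) (lo hi : Nat) : Nat :=
  if _h : lo < hi then
    if x < xs.getD ((lo + hi) / 2) 0 then pvBisectRightGo xs x lo ((lo + hi) / 2)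
    else pvBisectRightGo xs x ((lo + hi) / 2 + 1) hi
  else lo
termination_by hi - lo
decreasing_by all_goals omega

def pvBisectRight (xs : List Int) (x : Int) : Nat := pvBisectRightGo xs x 0 xs.length

-- A's code: build pref/acc by a loop, then fold the ranges adding pref[hi] - pref[lo].
-- (pref indices hi, lo are always ≤ len(sorted_vals) < len(pref), so getD is exact.)
def sum_in_ranges (sorted_vals : List Int) (ranges : List (Int × Int)) : Int :=
  let pa := sorted_vals.foldl
    (fun (p : List Int × Int) v => (p.1 ++ [p.2 + v], p.2 + v)) ([0], 0)
  ranges.foldl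
    (fun total ab =>
      let lo := pvBisectLeft sorted_vals ab.1
      let hi := pvBisectRight sorted_vals ab.2
      total + (pa.1.getD hi 0 - pa.1.getD lo 0)) 0

-- ===== PORT B =====
def sum_in_ranges_alt (sorted_vals : List Int) (ranges : List (Int × Int)) : Int :=
  ranges.foldl
    (fun total ab =>
      sorted_vals.foldl
        (fun t v =>
          let t1 := if v ≤ ab.2 then t + v else t
          if v < ab.1 then t1 - v else t1) total) 0

-- ===== PRECONDITION & SPEC =====
-- Pre_ excludes lists that are NOT sorted in nondecreasing order, except those whose every
-- query endpoint lies outside the span of the values (where bisect's answer is independent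
-- of element order): on other unsorted lists, bisect's binary-search result is an artefact
-- of the probe order that no scan reproduces.
def Pre_sum_in_ranges (sorted_vals : List Int) (ranges : List (Int × Int)) : Prop :=
  List.Pairwise (· ≤ ·) sorted_vals ∨
    (∀ ab ∈ ranges,
      ((∀ v ∈ sorted_vals, ab.1 ≤ v) ∨ (∀ v ∈ sorted_vals, v < ab.1)) ∧
      ((∀ v ∈ sorted_vals, v ≤ ab.2) ∨ (∀ v ∈ sorted_vals, ab.2 < v)))
instance (sorted_vals : List Int) (ranges : List (Int × Int)) : Decidable (Pre_sum_in_ranges sorted_vals ranges) := by unfold Pre_sum_in_ranges; infer_instance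

def pvWitness_sum_in_ranges : List Int × (List (Int × Int)) := ([1, 3, 5], [(2, 5), (5, 1)])

def Spec_sum_in_ranges (sorted_vals : List Int) (ranges : List (Int × Int)) (out : Int) : Prop := out = sum_in_ranges_alt sorted_vals ranges
instance (sorted_vals : List Int) (ranges : List (Int × Int)) (out : Int) : Decidable (Spec_sum_in_ranges sorted_vals ranges out) := by unfold Spec_sum_in_ranges; infer_instance

-- ===== CLAIM (what is proved, stated in full; the proofs are below) =====
def Claim_equal_sum_in_ranges : Prop := ∀ (sorted_vals : List Int) (ranges : List (Int × Int)), Dom_sum_in_ranges sorted_vals ranges → Pre_sum_in_ranges sorted_vals ranges → Spec_sum_in_ranges sorted_vals ranges (sum_in_ranges sorted_vals ranges)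

-- ===== LEMMAS AND PROOFS =====

-- the prefix-sum loop produces the cumulative-sum list
def pvPsums (acc : Int) : List Int → List Int
  | [] => []
  | v :: t => (acc + v) :: pvPsums (acc + v) t

theorem pvPref_fold (xs : List Int) (l : List Int) (acc : Int) :
    xs.foldl (fun (p : List Int × Int) v => (p.1 ++ [p.2 + v], p.2 + v)) (l, acc)
      = (l ++ pvPsums acc xs, acc + xs.sum) := by
  induction xs generalizing l acc with
  | nil => simp [pvPsums]
  | cons v t ih => simp [pvPsums, ih, List.append_assoc]; ring

theorem pvPsums_getD (xs : List Int) (acc : Int) (i : Nat) (hi : i < xs.length) :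
    (pvPsums acc xs).getD i 0 = acc + (xs.take (i + 1)).sum := by
  induction xs generalizing acc i with
  | nil => simp at hi
  | cons v t ih =>
    cases i with
    | zero => simp [pvPsums]
    | succ j =>
      simp only [pvPsums, List.getD_cons_succ, List.take_succ_cons, List.sum_cons]
      rw [ih (acc + v) j (by simpa using hi)]; ring

theorem pvPref_getD (xs : List Int) (i : Nat) (hi : i ≤ xs.length) :
    (([0] ++ pvPsums 0 xs : List Int)).getD i 0 = (xs.take i).sum := by
  cases i with
  | zero => simp
  | succ j =>
    simp only [List.cons_append, List.nil_append, List.getD_cons_succ]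
    rw [pvPsums_getD xs 0 j (by omega)]; simp

theorem pvGetD_mem (xs : List Int) (i : Nat) (hi : i < xs.length) : xs.getD i 0 ∈ xs := by
  rw [List.getD_eq_getElem?_getD, List.getElem?_eq_getElem hi]
  exact List.getElem_mem hi

-- sorted + a downward-closed predicate: the elements satisfying p sit at indices [0, countP p)
theorem pvSorted_getD_iff (xs : List Int) (p : Int → Bool)
    (hs : List.Pairwise (· ≤ ·) xs)
    (hdc : ∀ v w : Int, w ≤ v → p v = true → p w = true)
    (i : Nat) (hi : i < xs.length) :
    (p (xs.getD i 0) = true) ↔ i < xs.countP p := by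
  induction xs generalizing i with
  | nil => simp at hi
  | cons y t ih =>
    rw [List.pairwise_cons] at hs
    have hnil : p y = false → t.countP p = 0 := by
      intro hy
      rw [List.countP_eq_zero]
      intro v hv hpv
      have := hdc v y (hs.1 v hv) hpv
      simp [hy] at this
    cases i with
    | zero =>
      simp only [List.getD_cons_zero, List.countP_cons]
      cases hy : p y with
      | true => simp
      | false => simp [hnil hy]
    | succ j =>
      have hj : j < t.length := by simp at hi; omega
      simp only [List.getD_cons_succ, List.countP_cons]
      rw [ih hs.2 j hj]
      cases hy : p y with
      | true => simp
      | false => simp [hnil hy]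

-- binary-search invariant: if the elements satisfying the probe occupy exactly the indices
-- [0, c), the search returns c (no sortedness needed beyond that characterization)
theorem pvBisectLeftGo_eq (xs : List Int) (x : Int) (c : Nat)
    (hc : ∀ i, i < xs.length → ((xs.getD i 0 < x) ↔ i < c))
    (lo hi : Nat) (hlo : lo ≤ c) (hhi : c ≤ hi) (hlen : hi ≤ xs.length) :
    pvBisectLeftGo xs x lo hi = c := by
  unfold pvBisectLeftGo
  split
  · rename_i h
    have hm1 : lo ≤ (lo + hi) / 2 := by omega
    have hm2 : (lo + hi) / 2 < hi := by omega
    split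
    · rename_i hmid
      have := (hc ((lo + hi) / 2) (by omega)).mp hmid
      exact pvBisectLeftGo_eq xs x c hc _ hi (by omega) hhi hlen
    · rename_i hmid
      have : ¬ ((lo + hi) / 2 < c) := fun hlt => hmid ((hc _ (by omega)).mpr hlt)
      exact pvBisectLeftGo_eq xs x c hc lo _ hlo (by omega) (by omega)
  · omega
termination_by hi - lo
decreasing_by all_goals omega

theorem pvBisectRightGo_eq (xs : List Int) (x : Int) (c : Nat)
    (hc : ∀ i, i < xs.length → ((xs.getD i 0 ≤ x) ↔ i < c))
    (lo hi : Nat) (hlo : lo ≤ c) (hhi : c ≤ hi) (hlen : hi ≤ xs.length) :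
    pvBisectRightGo xs x lo hi = c := by
  unfold pvBisectRightGo
  split
  · rename_i h
    have hm1 : lo ≤ (lo + hi) / 2 := by omega
    have hm2 : (lo + hi) / 2 < hi := by omega
    split
    · rename_i hmid
      have : ¬ ((lo + hi) / 2 < c) := fun hlt => by
        have := (hc _ (by omega)).mpr hlt; omega
      exact pvBisectRightGo_eq xs x c hc lo _ hlo (by omega) (by omega)
    · rename_i hmid
      have := (hc ((lo + hi) / 2) (by omega)).mp (by omega)
      exact pvBisectRightGo_eq xs x c hc _ hi (by omega) hhi hlen
  · omega
termination_by hi - lo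
decreasing_by all_goals omega

-- sorted + downward-closed p: filter p is the prefix of length countP p
theorem pvFilter_eq_take (xs : List Int) (p : Int → Bool)
    (hs : List.Pairwise (· ≤ ·) xs)
    (hdc : ∀ v w : Int, w ≤ v → p v = true → p w = true) :
    xs.filter p = xs.take (xs.countP p) := by
  induction xs with
  | nil => simp
  | cons y t ih =>
    rw [List.pairwise_cons] at hs
    by_cases hy : p y = true
    · simp [hy, ih hs.2]
    · have ht : t.countP p = 0 := by
        rw [List.countP_eq_zero]
        intro v hv hpv
        exact hy (hdc v y (hs.1 v hv) hpv)
      have htf : t.filter p = [] := by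
        rw [List.filter_eq_nil_iff]
        intro v hv hpv
        exact hy (hdc v y (hs.1 v hv) hpv)
      simp [hy, ht, htf]

-- pref indexed at a bisect position gives the filtered sum: one lemma per side, each
-- holding when the list is sorted OR the endpoint lies outside the span of the values
theorem pvPrefAtLeft (xs : List Int) (a : Int)
    (h : List.Pairwise (· ≤ ·) xs ∨ (∀ v ∈ xs, a ≤ v) ∨ (∀ v ∈ xs, v < a)) :
    (([0] ++ pvPsums 0 xs : List Int)).getD (pvBisectLeft xs a) 0
      = (xs.filter (fun v => decide (v < a))).sum := by
  have hdc : ∀ v w : Int, w ≤ v → decide (v < a) = true → decide (w < a) = true := by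
    intro v w hw hv; simp at hv ⊢; omega
  rcases h with hs | hge | hlt
  · have hb : pvBisectLeft xs a = xs.countP (fun v => decide (v < a)) := by
      refine pvBisectLeftGo_eq xs a _ ?_ 0 xs.length (Nat.zero_le _)
        List.countP_le_length le_rfl
      intro i hi
      have := pvSorted_getD_iff xs (fun v => decide (v < a)) hs hdc i hi
      simpa using this
    rw [hb, pvPref_getD xs _ List.countP_le_length, ← pvFilter_eq_take xs _ hs hdc]
  · -- a is ≤ every value: bisect_left returns 0 regardless of element order
    have hb : pvBisectLeft xs a = 0 := by
      refine pvBisectLeftGo_eq xs a 0 ?_ 0 xs.length le_rfl (Nat.zero_le _) le_rfl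
      intro i hi
      have := hge _ (pvGetD_mem xs i hi)
      constructor
      · intro h'; omega
      · omega
    have hf : xs.filter (fun v => decide (v < a)) = [] := by
      rw [List.filter_eq_nil_iff]
      intro v hv
      have := hge v hv
      simp; omega
    rw [hb, hf]; simp
  · -- a is greater than every value: bisect_left returns len regardless of element order
    have hb : pvBisectLeft xs a = xs.length := by
      refine pvBisectLeftGo_eq xs a xs.length ?_ 0 xs.length (Nat.zero_le _) le_rfl le_rfl
      intro i hi
      have := hlt _ (pvGetD_mem xs i hi)
      constructor
      · intro _; exact hi
      · intro _; exact this
    have hf : xs.filter (fun v => decide (v < a)) = xs := by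
      rw [List.filter_eq_self]
      intro v hv
      have := hlt v hv
      simpa
    rw [hb, hf, pvPref_getD xs _ le_rfl]; simp
theorem pvPrefAtRight (xs : List Int) (b : Int)
    (h : List.Pairwise (· ≤ ·) xs ∨ (∀ v ∈ xs, v ≤ b) ∨ (∀ v ∈ xs, b < v)) :
    (([0] ++ pvPsums 0 xs : List Int)).getD (pvBisectRight xs b) 0
      = (xs.filter (fun v => decide (v ≤ b))).sum := by
  have hdc : ∀ v w : Int, w ≤ v → decide (v ≤ b) = true → decide (w ≤ b) = true := by
    intro v w hw hv; simp at hv ⊢; omega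
  rcases h with hs | hle | hgt
  · have hb : pvBisectRight xs b = xs.countP (fun v => decide (v ≤ b)) := by
      refine pvBisectRightGo_eq xs b _ ?_ 0 xs.length (Nat.zero_le _)
        List.countP_le_length le_rfl
      intro i hi
      have := pvSorted_getD_iff xs (fun v => decide (v ≤ b)) hs hdc i hi
      simpa using this
    rw [hb, pvPref_getD xs _ List.countP_le_length, ← pvFilter_eq_take xs _ hs hdc]
  · -- b is ≥ every value: bisect_right returns len regardless of element order
    have hb : pvBisectRight xs b = xs.length := by
      refine pvBisectRightGo_eq xs b xs.length ?_ 0 xs.length (Nat.zero_le _) le_rfl le_rfl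
      intro i hi
      have := hle _ (pvGetD_mem xs i hi)
      constructor
      · intro _; exact hi
      · intro _; exact this
    have hf : xs.filter (fun v => decide (v ≤ b)) = xs := by
      rw [List.filter_eq_self]
      intro v hv
      simpa using hle v hv
    rw [hb, hf, pvPref_getD xs _ le_rfl]; simp
  · -- b is below every value: bisect_right returns 0 regardless of element order
    have hb : pvBisectRight xs b = 0 := by
      refine pvBisectRightGo_eq xs b 0 ?_ 0 xs.length le_rfl (Nat.zero_le _) le_rfl
      intro i hi
      have := hgt _ (pvGetD_mem xs i hi)
      constructor
      · intro h'; omega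
      · omega
    have hf : xs.filter (fun v => decide (v ≤ b)) = [] := by
      rw [List.filter_eq_nil_iff]
      intro v hv
      have := hgt v hv
      simp; omega
    rw [hb, hf]; simp

-- B's inner scan adds the sum of values ≤ b and subtracts the sum of values < a
theorem pvScan_eq (xs : List Int) (a b t : Int) :
    xs.foldl
      (fun t v =>
        let t1 := if v ≤ b then t + v else t
        if v < a then t1 - v else t1) t
      = t + (xs.filter (fun v => decide (v ≤ b))).sum
          - (xs.filter (fun v => decide (v < a))).sum := by
  induction xs generalizing t with
  | nil => simp
  | cons y ys ih =>
    simp only [List.foldl_cons, List.filter_cons]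
    rw [ih]
    by_cases h1 : y ≤ b <;> by_cases h2 : y < a <;> simp [h1, h2] <;> ring

-- the two range folds agree given Pre_
theorem pvFold_eq (xs : List Int) (ranges : List (Int × Int)) (init : Int)
    (hpre : List.Pairwise (· ≤ ·) xs ∨
      (∀ ab ∈ ranges,
        ((∀ v ∈ xs, ab.1 ≤ v) ∨ (∀ v ∈ xs, v < ab.1)) ∧
        ((∀ v ∈ xs, v ≤ ab.2) ∨ (∀ v ∈ xs, ab.2 < v)))) :
    ranges.foldl
      (fun total ab =>
        total + ((([0] ++ pvPsums 0 xs : List Int)).getD (pvBisectRight xs ab.2) 0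
              - (([0] ++ pvPsums 0 xs : List Int)).getD (pvBisectLeft xs ab.1) 0)) init
    = ranges.foldl
      (fun total ab =>
        xs.foldl
          (fun t v =>
            let t1 := if v ≤ ab.2 then t + v else t
            if v < ab.1 then t1 - v else t1) total) init := by
  induction ranges generalizing init with
  | nil => rfl
  | cons ab rs ih =>
    have hab : List.Pairwise (· ≤ ·) xs ∨
        (((∀ v ∈ xs, ab.1 ≤ v) ∨ (∀ v ∈ xs, v < ab.1)) ∧
         ((∀ v ∈ xs, v ≤ ab.2) ∨ (∀ v ∈ xs, ab.2 < v))) := by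
      rcases hpre with hs | he
      · exact Or.inl hs
      · exact Or.inr (he ab (List.mem_cons_self ..))
    have hrest : List.Pairwise (· ≤ ·) xs ∨
        (∀ ab' ∈ rs,
          ((∀ v ∈ xs, ab'.1 ≤ v) ∨ (∀ v ∈ xs, v < ab'.1)) ∧
          ((∀ v ∈ xs, v ≤ ab'.2) ∨ (∀ v ∈ xs, ab'.2 < v))) := by
      rcases hpre with hs | he
      · exact Or.inl hs
      · exact Or.inr (fun ab' h => he ab' (List.mem_cons_of_mem _ h))
    simp only [List.foldl_cons]
    rw [ih _ hrest]
    congr 1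
    have hl : List.Pairwise (· ≤ ·) xs ∨ (∀ v ∈ xs, ab.1 ≤ v) ∨ (∀ v ∈ xs, v < ab.1) := by
      rcases hab with hs | he
      · exact Or.inl hs
      · exact Or.inr he.1
    have hr : List.Pairwise (· ≤ ·) xs ∨ (∀ v ∈ xs, v ≤ ab.2) ∨ (∀ v ∈ xs, ab.2 < v) := by
      rcases hab with hs | he
      · exact Or.inl hs
      · exact Or.inr he.2
    rw [pvScan_eq, pvPrefAtLeft xs ab.1 hl, pvPrefAtRight xs ab.2 hr]
    omega

-- ===== VERDICT (by name: the statement is the Claim_ definition above) =====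
theorem sum_in_ranges_spec : Claim_equal_sum_in_ranges := by
  intro xs ranges _ hpre
  unfold Spec_sum_in_ranges sum_in_ranges sum_in_ranges_alt
  rw [pvPref_fold xs [0] 0]
  exact pvFold_eq xs ranges 0 hpre
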